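-- pv_equiv track=rewrite | github.com/bdenckla/MAM-basics | py/pympp/mpp_slh_words.py | _my_rpartition
-- ===== SOURCE A (Python) =====
-- def _my_rpartition(string):
--     seps = " =<>,;:"
--     partitions = [string.rpartition(sep) for sep in seps]
--     shortest_partition = partitions[0]
--     for partition in partitions[1:]:
--         if len(partition[2]) < len(shortest_partition[2]):
--             shortest_partition = partition
--     if shortest_partition[2] == string:
--         return None
--     return shortest_partition
-- ===== SOURCE B (Python) =====
-- def _my_rpartition(string):
--     seps = set(" =<>,;:")
--     for i in range(len(string) - 1, -1, -1):
--         if string[i] in seps: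
--             return (string[:i], string[i], string[i + 1:])
--     return None
-- ===== Notes on version B (the rewrite author's own statement) =====
-- stated objective: simpler
-- what changed: Replaces the 7 rpartition calls plus shortest-tail fold with a single right-to-left scan that returns at the first (i.e. rightmost) separator character.
import Mathlib
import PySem

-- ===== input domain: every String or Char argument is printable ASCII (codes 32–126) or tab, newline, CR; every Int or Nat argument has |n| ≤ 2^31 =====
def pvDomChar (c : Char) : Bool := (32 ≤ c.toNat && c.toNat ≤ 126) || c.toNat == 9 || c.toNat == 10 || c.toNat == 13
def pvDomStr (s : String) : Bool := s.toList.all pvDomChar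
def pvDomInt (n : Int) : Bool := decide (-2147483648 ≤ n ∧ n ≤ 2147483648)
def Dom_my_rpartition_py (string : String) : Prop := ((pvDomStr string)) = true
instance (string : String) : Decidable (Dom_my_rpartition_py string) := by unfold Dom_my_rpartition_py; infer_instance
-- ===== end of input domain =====

-- B replaces A's seven rpartition calls plus shortest-tail fold with one right-to-left
-- scan that stops at the rightmost separator character (objective: simpler).

-- ===== PORT A =====
-- exact hand port of Python str.rpartition for a single-character separator:
-- the rightmost occurrence is the first match in the reversed character list
def pyRpartition (s : List Char) (c : Char) : List Char × List Char × List Char :=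
  match s.reverse.findIdx? (fun x => x == c) with
  | none => ([], [], s)
  | some k =>
    let j := s.length - 1 - k
    (s.take j, [c], s.drop (j + 1))

def my_rpartition_py (string : String) : Option (String × String × String) :=
  let s := string.toList
  let seps := " =<>,;:"
  let partitions := seps.toList.map (fun sep => pyRpartition s sep)
  let shortest := (partitions.drop 1).foldl
    (fun best p => if p.2.2.length < best.2.2.length then p else best) partitions.headI
  if shortest.2.2 = s then none
  else some (String.mk shortest.1, String.mk shortest.2.1, String.mk shortest.2.2)

-- ===== PORT B =====
-- `altGo seps s i` is Source B's `for i in range(len(string)-1, -1, -1)` loop restricted to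
-- indices < i; `s.getD i ' '` ports `string[i]`, exact since every call has i < s.length.
def altGo (seps : PySem.Set Char) (s : List Char) : Nat → Option (String × String × String)
  | 0 => none
  | i + 1 =>
    let c := s.getD i ' '
    if PySem.Set.contains seps c then
      some (String.mk (s.take i), String.mk [c], String.mk (s.drop (i + 1)))
    else altGo seps s i

def my_rpartition_py_alt (string : String) : Option (String × String × String) :=
  let seps := PySem.Set.ofList " =<>,;:".toList
  altGo seps string.toList string.toList.length

-- ===== PRECONDITION & SPEC =====
def Spec_my_rpartition_py (string : String) (out : Option (String × String × String)) : Prop := out = my_rpartition_py_alt string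
instance (string : String) (out : Option (String × String × String)) : Decidable (Spec_my_rpartition_py string out) := by unfold Spec_my_rpartition_py; infer_instance

-- ===== CLAIM (what is proved, stated in full; the proofs are below) =====
def Claim_equal_my_rpartition_py : Prop := ∀ (string : String), Dom_my_rpartition_py string → Spec_my_rpartition_py string (my_rpartition_py string)

-- ===== LEMMAS AND PROOFS =====

-- the separator predicate both characterizations use
def sepP (x : Char) : Bool := (" =<>,;:".toList).contains x

-- the common reference value: split at the rightmost separator position
def refSplit (s : List Char) : Option (String × String × String) :=
  match s.reverse.findIdx? sepP with
  | none => none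
  | some k =>
    let j := s.length - 1 - k
    some (String.mk (s.take j), String.mk [s.getD j ' '], String.mk (s.drop (j + 1)))

lemma set_contains_eq_sepP (c : Char) :
    PySem.Set.contains (PySem.Set.ofList " =<>,;:".toList) c = sepP c := by
  have h : PySem.Set.ofList " =<>,;:".toList = " =<>,;:".toList := by decide
  unfold PySem.Set.contains
  rw [h]
  rfl

-- B characterization: the scan down from i finds the rightmost separator among indices < i
lemma altGo_eq (s : List Char) :
    ∀ i : Nat, i ≤ s.length →
      altGo (PySem.Set.ofList " =<>,;:".toList) s i =
        match (s.take i).reverse.findIdx? sepP with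
        | none => none
        | some k =>
          let j := i - 1 - k
          some (String.mk (s.take j), String.mk [s.getD j ' '], String.mk (s.drop (j + 1))) := by
  intro i
  induction i with
  | zero => intro _; simp [altGo]
  | succ i ih =>
    intro hle
    have hi : i < s.length := by omega
    have htake : s.take (i + 1) = s.take i ++ [s[i]] := by
      rw [List.take_succ]; simp [List.getElem?_eq_getElem hi]
    have hgetD : s.getD i ' ' = s[i] := List.getD_eq_getElem s ' ' hi
    rw [altGo, set_contains_eq_sepP, hgetD, htake, List.reverse_append]
    simp only [List.reverse_singleton, List.singleton_append, List.findIdx?_cons]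
    by_cases hsep : sepP s[i] = true
    · rw [if_pos hsep, hsep]
      simp [List.getD, List.getElem?_eq_getElem hi]
    · have hsf : sepP s[i] = false := Bool.not_eq_true _ |>.mp hsep
      rw [if_neg hsep, hsf, ih (by omega)]
      cases hfd : (s.take i).reverse.findIdx? sepP with
      | none => simp
      | some k =>
        have h2 : i - 1 - k = i - (k + 1) := by omega
        simp [h2]

lemma B_char (string : String) : my_rpartition_py_alt string = refSplit string.toList := by
  unfold my_rpartition_py_alt refSplit
  rw [altGo_eq string.toList string.toList.length (le_refl _)]
  rw [List.take_length]

-- the generic fold: if q occurs and strictly minimizes the measure among all candidates,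
-- the strict-less-than fold returns q
lemma foldl_min_pick {α : Type} (m : α → Nat) (q : α) :
    ∀ (l : List α) (b : α), (b = q ∨ q ∈ l) →
      (∀ p, (p = b ∨ p ∈ l) → p = q ∨ m q < m p) →
      l.foldl (fun best p => if m p < m best then p else best) b = q := by
  intro l
  induction l with
  | nil =>
    intro b hq hmin
    rcases hq with h | h
    · simpa using h
    · simp at h
  | cons p' rest ih =>
    intro b hq hmin
    simp only [List.foldl_cons]
    have hkeep : ∀ p, (p = b ∨ p ∈ rest) → p = q ∨ m q < m p :=
      fun p hp => hmin p (hp.imp id (List.mem_cons_of_mem _))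
    have hnew : ∀ p, (p = p' ∨ p ∈ rest) → p = q ∨ m q < m p :=
      fun p hp => hmin p (Or.inr (by
        rcases hp with h1 | h1
        exacts [h1 ▸ List.mem_cons_self, List.mem_cons_of_mem _ h1]))
    by_cases hb : b = q
    · rcases hmin p' (Or.inr List.mem_cons_self) with h | h
      · rw [if_neg (by rw [h, hb]; exact lt_irrefl _)]
        exact ih b (Or.inl hb) hkeep
      · rw [if_neg (by rw [hb]; omega)]
        exact ih b (Or.inl hb) hkeep
    · have hbq : m q < m b := by
        rcases hmin b (Or.inl rfl) with h | h
        · exact absurd h hb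
        · exact h
      rcases hmin p' (Or.inr List.mem_cons_self) with h | h
      · rw [if_pos (by rw [h]; exact hbq)]
        exact ih p' (Or.inl h) hnew
      · have hqrest : q ∈ rest := by
          rcases hq with h1 | h1
          · exact absurd h1 hb
          · rcases List.mem_cons.mp h1 with h2 | h2
            · exfalso; rw [h2] at h; exact lt_irrefl _ h
            · exact h2
        split
        · exact ih p' (Or.inr hqrest) hnew
        · exact ih b (Or.inr hqrest) hkeep

-- A characterization
lemma sepP_cases (c : Char) (hc : sepP c = true) :
    c = ' ' ∨ c = '=' ∨ c = '<' ∨ c = '>' ∨ c = ',' ∨ c = ';' ∨ c = ':' := by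
  unfold sepP at hc
  have : c ∈ " =<>,;:".toList := by simpa using hc
  simpa using this

lemma A_char (string : String) : my_rpartition_py string = refSplit string.toList := by
  unfold my_rpartition_py refSplit
  set s := string.toList with hs
  have e1 : (" =<>,;:").toList = [' ', '=', '<', '>', ',', ';', ':'] := by decide
  simp only [e1, List.map_cons, List.map_nil, List.headI, List.drop_succ_cons, List.drop_zero]
  cases h : s.reverse.findIdx? sepP with
  | none =>
    have hall : ∀ x ∈ s.reverse, sepP x = false := List.findIdx?_eq_none_iff.mp h
    have hz : ∀ c, sepP c = true → pyRpartition s c = ([], [], s) := by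
      intro c hc
      unfold pyRpartition
      have hn : s.reverse.findIdx? (fun x => x == c) = none := by
        rw [List.findIdx?_eq_none_iff]
        intro x hx
        have hxf := hall x hx
        by_contra hxc
        have : x = c := by simpa using hxc
        rw [this] at hxf
        rw [hxf] at hc
        exact Bool.false_ne_true hc
      rw [hn]
    rw [hz ' ' (by decide), hz '=' (by decide), hz '<' (by decide), hz '>' (by decide),
        hz ',' (by decide), hz ';' (by decide), hz ':' (by decide)]
    simp
  | some k =>
    obtain ⟨hk, px, hmin⟩ := List.findIdx?_eq_some_iff_getElem.mp h
    have hks : k < s.length := by simpa using hk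
    set j := s.length - 1 - k with hj
    have hjs : j < s.length := by omega
    have hxj : s.reverse[k] = s[j] := by
      rw [List.getElem_reverse]
    set x := s[j] with hx
    have px' : sepP x = true := by rw [← hxj]; exact px
    -- the winning partition
    set q : List Char × List Char × List Char := (s.take j, [x], s.drop (j + 1)) with hq
    have key1 : s.reverse.findIdx? (fun y => y == x) = some k := by
      rw [List.findIdx?_eq_some_iff_getElem]
      refine ⟨hk, by simp [hxj], ?_⟩
      intro i hik
      have hsf := hmin i hik
      simp only [beq_iff_eq]
      intro heq
      rw [heq] at hsf
      exact hsf px'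
    have hqx : pyRpartition s x = q := by
      unfold pyRpartition
      rw [key1]
    have hmq : q.2.2.length = k := by
      simp [hq]
      omega
    -- every other separator's partition has a strictly longer tail
    have key2 : ∀ c, sepP c = true → pyRpartition s c = q ∨ k < (pyRpartition s c).2.2.length := by
      intro c hc
      by_cases hcx : c = x
      · exact Or.inl (by rw [hcx, hqx])
      · right
        unfold pyRpartition
        cases hfc : s.reverse.findIdx? (fun y => y == c) with
        | none => simpa using hks
        | some k' =>
          obtain ⟨hk', pc', hmin'⟩ := List.findIdx?_eq_some_iff_getElem.mp hfc
          have hc' : s.reverse[k'] = c := by simpa using pc'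
          have hkk : k < k' := by
            rcases lt_trichotomy k' k with hlt | heq | hgt
            · exfalso
              have := hmin k' hlt
              rw [hc'] at this
              exact this hc
            · exfalso
              apply hcx
              subst heq
              rw [← hc', hxj]
            · exact hgt
          have hk's : k' < s.length := by simpa using hk'
          simp only [List.length_drop]
          omega
    have hfold :
        ([pyRpartition s '=', pyRpartition s '<', pyRpartition s '>', pyRpartition s ',',
          pyRpartition s ';', pyRpartition s ':'].foldl
          (fun best p => if p.2.2.length < best.2.2.length then p else best)
          (pyRpartition s ' ')) = q := by
      apply foldl_min_pick (fun p => p.2.2.length) q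
      · rcases sepP_cases x px' with h1 | h1 | h1 | h1 | h1 | h1 | h1 <;>
          rw [h1] at hqx <;> simp [← hqx]
      · intro p hp
        have : ∃ c, sepP c = true ∧ p = pyRpartition s c := by
          rcases hp with h1 | h1
          · exact ⟨' ', by decide, h1⟩
          · simp only [List.mem_cons, List.not_mem_nil, or_false] at h1
            rcases h1 with h1 | h1 | h1 | h1 | h1 | h1 <;>
              first
              | exact ⟨'=', by decide, h1⟩
              | exact ⟨'<', by decide, h1⟩
              | exact ⟨'>', by decide, h1⟩
              | exact ⟨',', by decide, h1⟩
              | exact ⟨';', by decide, h1⟩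
              | exact ⟨':', by decide, h1⟩
        obtain ⟨c, hc, hpc⟩ := this
        rcases key2 c hc with h2 | h2
        · exact Or.inl (by rw [hpc, h2])
        · right
          rw [hpc, hmq]
          exact h2
    rw [hfold]
    have htail : q.2.2 ≠ s := by
      intro heq
      have : q.2.2.length = s.length := by rw [heq]
      rw [hmq] at this
      omega
    rw [if_neg htail]
    have hgd : s[s.length - 1 - k]?.getD ' ' = x := by
      rw [List.getElem?_eq_getElem (show s.length - 1 - k < s.length by omega)]
      rfl
    simp [hq, hj, hgd]

-- ===== VERDICT (by name: the statement is the Claim_ definition above) =====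
theorem my_rpartition_py_spec : Claim_equal_my_rpartition_py := by
  intro string _
  unfold Spec_my_rpartition_py
  rw [A_char, B_char]
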